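-- pv_equiv track=rewrite | github.com/weiyangzen/awesome_algorithms | Algorithms/计算机-排序算法-0009-基数排序_(Radix_Sort)/demo.py | _stable_counting_pass
-- ===== SOURCE A (Python) =====
-- def _stable_counting_pass(values: list[int], exp: int, base: int) -> tuple[list[int], list[int]]:
--     """Stable counting distribution for one digit (defined by exp/base)."""
--     counts = [0] * base
--     for x in values:
--         digit = (x // exp) % base
--         counts[digit] += 1
--
--     histogram = counts.copy()
--
--     for i in range(1, base):
--         counts[i] += counts[i - 1]
--
--     output = [0] * len(values)
--     for i in range(len(values) - 1, -1, -1):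
--         digit = (values[i] // exp) % base
--         counts[digit] -= 1
--         output[counts[digit]] = values[i]
--
--     return output, histogram
-- ===== SOURCE B (Python) =====
-- def _stable_counting_pass(values: list[int], exp: int, base: int) -> tuple[list[int], list[int]]:
--     """Bucket distribution for one digit: one forward pass into per-digit buckets."""
--     buckets = [[] for _ in range(base)]
--     for x in values:
--         buckets[(x // exp) % base].append(x)
--     output = [x for b in buckets for x in b]
--     histogram = [len(b) for b in buckets]
--     return output, histogram
-- ===== Notes on version B (the rewrite author's own statement) =====
-- stated objective: simpler
-- what changed: Replaces the three-pass counting sort (histogram, in-place prefix sums, backward placement into a preallocated array) by a single forward pass appending each value to a per-digit bucket and then flattening the buckets in digit order; the histogram is read off as the bucket lengths.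
import Mathlib
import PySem

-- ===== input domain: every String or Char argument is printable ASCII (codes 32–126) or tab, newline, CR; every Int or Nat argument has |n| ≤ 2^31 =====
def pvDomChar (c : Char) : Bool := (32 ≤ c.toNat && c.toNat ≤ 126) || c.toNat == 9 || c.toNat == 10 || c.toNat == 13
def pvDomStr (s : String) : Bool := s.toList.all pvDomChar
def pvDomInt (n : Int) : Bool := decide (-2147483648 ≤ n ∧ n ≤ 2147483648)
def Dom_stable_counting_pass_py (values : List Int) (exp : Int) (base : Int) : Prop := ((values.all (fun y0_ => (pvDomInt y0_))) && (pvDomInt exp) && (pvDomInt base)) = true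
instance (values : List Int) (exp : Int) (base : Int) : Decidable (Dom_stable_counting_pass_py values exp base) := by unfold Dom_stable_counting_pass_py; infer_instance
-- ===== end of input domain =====

-- B replaces A's three-pass counting sort (histogram, prefix sums, backward placement)
-- by one forward pass into per-digit buckets that are flattened in digit order (objective: simpler).

-- ===== PORT A =====
def stable_counting_pass_py (values : List Int) (exp : Int) (base : Int) : List Int × List Int :=
  -- counts = [0] * base; for x in values: counts[(x // exp) % base] += 1
  let counts : List Int := List.replicate base.toNat 0
  let counts := values.foldl (fun cs x =>
      PySem.List.pySetD cs (PySem.Int.mod (PySem.Int.floordiv x exp) base)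
        (PySem.List.pyGetD cs (PySem.Int.mod (PySem.Int.floordiv x exp) base) 0 + 1)) counts
  -- histogram = counts.copy()
  let histogram := counts
  -- for i in range(1, base): counts[i] += counts[i - 1]
  let counts := (PySem.List.pyRange 1 base 1).foldl (fun cs i =>
      PySem.List.pySetD cs i (PySem.List.pyGetD cs i 0 + PySem.List.pyGetD cs (i - 1) 0)) counts
  -- output = [0] * len(values)
  let output : List Int := List.replicate values.length 0
  -- for i in range(len(values) - 1, -1, -1):
  --     digit = (values[i] // exp) % base; counts[digit] -= 1; output[counts[digit]] = values[i]
  let st := (PySem.List.pyRange ((values.length : Int) - 1) (-1) (-1)).foldl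
      (fun (st : List Int × List Int) i =>
        (PySem.List.pySetD st.1 (PySem.Int.mod (PySem.Int.floordiv (PySem.List.pyGetD values i 0) exp) base)
           (PySem.List.pyGetD st.1 (PySem.Int.mod (PySem.Int.floordiv (PySem.List.pyGetD values i 0) exp) base) 0 - 1),
         PySem.List.pySetD st.2
           (PySem.List.pyGetD st.1 (PySem.Int.mod (PySem.Int.floordiv (PySem.List.pyGetD values i 0) exp) base) 0 - 1)
           (PySem.List.pyGetD values i 0))) (counts, output)
  (st.2, histogram)

-- ===== PORT B =====
def stable_counting_pass_py_alt (values : List Int) (exp : Int) (base : Int) : List Int × List Int :=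
  -- buckets = [[] for _ in range(base)]; for x in values: buckets[(x // exp) % base].append(x)
  let buckets : List (List Int) := List.replicate base.toNat []
  let buckets := values.foldl (fun bs x =>
      PySem.List.pySetD bs (PySem.Int.mod (PySem.Int.floordiv x exp) base)
        (PySem.List.pyGetD bs (PySem.Int.mod (PySem.Int.floordiv x exp) base) [] ++ [x])) buckets
  -- output = [x for b in buckets for x in b]; histogram = [len(b) for b in buckets]
  (buckets.flatten, buckets.map (fun b => (b.length : Int)))

-- ===== PRECONDITION & SPEC =====
-- Pre_ excludes exactly the inputs on which A raises: with a nonempty values list, exp = 0 or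
-- base = 0 raises ZeroDivisionError and base < 0 raises IndexError; on empty values A always returns.
def Pre_stable_counting_pass_py (values : List Int) (exp : Int) (base : Int) : Prop :=
  values = [] ∨ (exp ≠ 0 ∧ 0 < base)
instance (values : List Int) (exp : Int) (base : Int) : Decidable (Pre_stable_counting_pass_py values exp base) := by unfold Pre_stable_counting_pass_py; infer_instance

def pvWitness_stable_counting_pass_py : List Int × Int × Int := ([170, 45, 75, 90, 2], 1, 10)

def Spec_stable_counting_pass_py (values : List Int) (exp : Int) (base : Int) (out : List Int × List Int) : Prop := out = stable_counting_pass_py_alt values exp base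
instance (values : List Int) (exp : Int) (base : Int) (out : List Int × List Int) : Decidable (Spec_stable_counting_pass_py values exp base out) := by unfold Spec_stable_counting_pass_py; infer_instance

-- ===== CLAIM (what is proved, stated in full; the proofs are below) =====
def Claim_equal_stable_counting_pass_py : Prop := ∀ (values : List Int) (exp : Int) (base : Int), Dom_stable_counting_pass_py values exp base → Pre_stable_counting_pass_py values exp base → Spec_stable_counting_pass_py values exp base (stable_counting_pass_py values exp base)

-- ===== LEMMAS AND PROOFS =====

-- the digit of x as a natural number (= (x // exp) % base, which lies in [0, base) when 0 < base)
def pvDig (exp base x : Int) : Nat := (PySem.Int.mod (PySem.Int.floordiv x exp) base).toNat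

-- number of elements of vs whose digit is j
def pvCnt (exp base : Int) (j : Nat) (vs : List Int) : Nat :=
  vs.countP (fun y => pvDig exp base y == j)

-- partial sums of a size function (start offset of segment j)
def pvOff (f : Nat → Nat) (j : Nat) : Nat := ((List.range j).map f).sum

lemma pvDig_lt (exp base : Int) (hb : 0 < base) (x : Int) : pvDig exp base x < base.toNat := by
  have h1 := PySem.Int.mod_nonneg (PySem.Int.floordiv x exp) hb
  have h2 := PySem.Int.mod_lt (PySem.Int.floordiv x exp) hb
  unfold pvDig; omega

lemma pvDig_cast (exp base : Int) (hb : 0 < base) (x : Int) :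
    PySem.Int.mod (PySem.Int.floordiv x exp) base = ((pvDig exp base x : Nat) : Int) := by
  have h1 := PySem.Int.mod_nonneg (PySem.Int.floordiv x exp) hb
  unfold pvDig; omega

lemma pvSet_map_range {α : Type} (g : Nat → α) (M j0 : Nat) (v : α) (_h : j0 < M) :
    ((List.range M).map g).set j0 v = (List.range M).map (fun j => if j = j0 then v else g j) := by
  apply List.ext_getElem (by simp)
  intro i h1 h2
  simp only [List.length_map, List.length_range] at h1 h2
  by_cases hi : i = j0
  · simp [hi]
  · simp [hi, Ne.symm hi]

lemma pvSetAppendLeft (l1 l2 : List Int) (n : Nat) (v : Int) (h : n < l1.length) :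
    (l1 ++ l2).set n v = l1.set n v ++ l2 := by
  rw [List.set_append]; simp [h]

lemma pvSetAppendRight (l1 l2 : List Int) (n : Nat) (v : Int) :
    (l1 ++ l2).set (l1.length + n) v = l1 ++ l2.set n v := by
  rw [List.set_append]; simp

lemma pvTakeSet (l : List Int) (n : Nat) (v : Int) (h : n + 1 ≤ l.length) :
    (l.take (n + 1)).set n v = l.take n ++ [v] := by
  rw [List.set_eq_take_cons_drop v (by rw [List.length_take]; omega)]
  rw [List.take_take, List.drop_take]
  simp

lemma pvOff_succ (f : Nat → Nat) (j : Nat) : pvOff f (j + 1) = pvOff f j + f j := by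
  simp [pvOff, List.range_succ]

lemma pvCastSum (f : Nat → Nat) (l : List Nat) :
    (l.map (fun n => ((f n : Nat) : Int))).sum = (((l.map f).sum : Nat) : Int) := by
  induction l with
  | nil => simp
  | cons x t ih =>
    rw [List.map_cons, List.sum_cons, ih, List.map_cons, List.sum_cons]
    push_cast; ring

-- A's first loop: counting pass over a counts list presented as a map over range
lemma pvCountLoop (exp base : Int) (hb : 0 < base) (vs : List Int) :
    ∀ (g : Nat → Int),
    vs.foldl (fun cs x =>
        PySem.List.pySetD cs (PySem.Int.mod (PySem.Int.floordiv x exp) base)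
          (PySem.List.pyGetD cs (PySem.Int.mod (PySem.Int.floordiv x exp) base) 0 + 1))
      ((List.range base.toNat).map g)
    = (List.range base.toNat).map (fun j => g j + (pvCnt exp base j vs : Int)) := by
  induction vs with
  | nil => intro g; simp [pvCnt]
  | cons y s ih =>
    intro g
    rw [List.foldl_cons, pvDig_cast exp base hb y, PySem.List.pySetD_natCast,
        PySem.List.pyGetD_natCast,
        PySem.List.getD_map_range g _ _ _ (pvDig_lt exp base hb y),
        pvSet_map_range g _ _ _ (pvDig_lt exp base hb y), ih]
    apply List.map_congr_left
    intro j hj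
    have hcnt : pvCnt exp base j (y :: s)
        = pvCnt exp base j s + (if pvDig exp base y = j then 1 else 0) := by
      simp [pvCnt, List.countP_cons]
    rcases eq_or_ne j (pvDig exp base y) with h | h
    · subst h
      rw [if_pos rfl, hcnt, if_pos rfl]
      push_cast; ring
    · rw [if_neg h, hcnt, if_neg (Ne.symm h)]
      push_cast; ring

-- B's loop: bucket pass
lemma pvBucketLoop (exp base : Int) (hb : 0 < base) (vs : List Int) :
    ∀ (g : Nat → List Int),
    vs.foldl (fun bs x =>
        PySem.List.pySetD bs (PySem.Int.mod (PySem.Int.floordiv x exp) base)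
          (PySem.List.pyGetD bs (PySem.Int.mod (PySem.Int.floordiv x exp) base) [] ++ [x]))
      ((List.range base.toNat).map g)
    = (List.range base.toNat).map (fun j => g j ++ vs.filter (fun y => pvDig exp base y == j)) := by
  induction vs with
  | nil => intro g; simp
  | cons y s ih =>
    intro g
    rw [List.foldl_cons, pvDig_cast exp base hb y, PySem.List.pySetD_natCast,
        PySem.List.pyGetD_natCast,
        PySem.List.getD_map_range g _ _ _ (pvDig_lt exp base hb y),
        pvSet_map_range g _ _ _ (pvDig_lt exp base hb y), ih]
    apply List.map_congr_left
    intro j hj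
    rcases eq_or_ne j (pvDig exp base y) with h | h
    · subst h
      rw [if_pos rfl]
      simp
    · rw [if_neg h]
      simp [Ne.symm h]

-- A's second loop: in-place prefix sums (invariant over the processed prefix of range(1, base))
lemma pvPrefixAux (g : Nat → Int) (M : Nat) :
    ∀ (k : Nat), 1 ≤ k → k ≤ M →
    (PySem.List.pyRange 1 (k : Int) 1).foldl (fun cs i =>
        PySem.List.pySetD cs i (PySem.List.pyGetD cs i 0 + PySem.List.pyGetD cs (i - 1) 0))
      ((List.range M).map g)
    = (List.range M).map (fun j => if j < k then ((List.range (j + 1)).map g).sum else g j) := by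
  intro k
  induction k with
  | zero => omega
  | succ k ih =>
    intro _ hkM
    by_cases hk1 : k = 0
    · subst hk1
      rw [PySem.List.pyRange_one_eq_nil (by norm_num)]
      simp only [List.foldl_nil]
      apply List.map_congr_left
      intro j hj
      by_cases h : j < 1
      · have hj0 : j = 0 := by omega
        simp [hj0, List.range_one]
      · simp [h]
    · have hk : 1 ≤ k := by omega
      have hcast : ((k : Int) + 1) = ((k + 1 : Nat) : Int) := by push_cast; ring
      rw [← hcast, PySem.List.pyRange_one_succ_right (by exact_mod_cast hk),
          List.foldl_append, ih hk (by omega)]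
      simp only [List.foldl_cons, List.foldl_nil]
      have hkM' : k < M := by omega
      have hk1M : k - 1 < M := by omega
      have hsub : ((k : Int) - 1) = ((k - 1 : Nat) : Int) := by omega
      rw [hsub, PySem.List.pySetD_natCast, PySem.List.pyGetD_natCast, PySem.List.pyGetD_natCast,
          PySem.List.getD_map_range _ _ _ _ hkM', PySem.List.getD_map_range _ _ _ _ hk1M,
          pvSet_map_range _ _ _ _ hkM']
      have hV : (if k < k then ((List.range (k + 1)).map g).sum else g k)
          + (if k - 1 < k then ((List.range (k - 1 + 1)).map g).sum else g (k - 1))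
          = ((List.range (k + 1)).map g).sum := by
        rw [if_neg (by omega), if_pos (by omega), (by omega : k - 1 + 1 = k),
            List.range_succ, List.map_append, List.sum_append]
        simp; ring
      simp only [hV]
      apply List.map_congr_left
      intro j hj
      rcases eq_or_ne j k with rfl | hjk
      · rw [if_pos rfl, if_pos (Nat.lt_succ_self j)]
      · rw [if_neg hjk]
        by_cases hlt : j < k
        · rw [if_pos hlt, if_pos (by omega)]
        · rw [if_neg hlt, if_neg (by omega)]

-- flatten of per-digit replicate blocks is one big replicate
lemma pvFlattenReplicate (h : Nat → Nat) (l : List Nat) :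
    (l.map (fun j => List.replicate (h j) (0 : Int))).flatten
      = List.replicate ((l.map h).sum) 0 := by
  induction l with
  | nil => simp
  | cons x t ih =>
    rw [List.map_cons, List.flatten_cons, ih, List.map_cons, List.sum_cons, List.replicate_add]

lemma pvSumIte (t : Nat) (N : Nat) :
    ((List.range N).map (fun j => if t == j then 1 else 0)).sum = if t < N then 1 else 0 := by
  induction N with
  | zero => simp
  | succ n ih =>
    rw [List.range_succ, List.map_append, List.sum_append, ih]
    by_cases h : t = n
    · subst h
      simp
    · by_cases h2 : t < n
      · simp [h, h2, (by omega : t < n + 1)]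
      · simp [h, h2]
        omega

lemma pvSumMapAdd (A B : Nat → Nat) (l : List Nat) :
    (l.map (fun j => A j + B j)).sum = (l.map A).sum + (l.map B).sum := by
  induction l with
  | nil => simp
  | cons x t ih => simp [ih]; ring

-- total count over all digits is the length
lemma pvSumCnt (exp base : Int) (hb : 0 < base) (vs : List Int) :
    ((List.range base.toNat).map (fun j => pvCnt exp base j vs)).sum = vs.length := by
  induction vs with
  | nil => simp [pvCnt]
  | cons y s ih =>
    have h1 : ∀ j, pvCnt exp base j (y :: s)
        = pvCnt exp base j s + (if pvDig exp base y == j then 1 else 0) := by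
      intro j; simp [pvCnt, List.countP_cons]
    calc ((List.range base.toNat).map (fun j => pvCnt exp base j (y :: s))).sum
        = ((List.range base.toNat).map (fun j =>
            pvCnt exp base j s + (if pvDig exp base y == j then 1 else 0))).sum := by
          exact congrArg _ (List.map_congr_left (fun j _ => h1 j))
      _ = ((List.range base.toNat).map (fun j => pvCnt exp base j s)).sum
            + ((List.range base.toNat).map (fun j => if pvDig exp base y == j then 1 else 0)).sum :=
          pvSumMapAdd _ _ _
      _ = s.length + 1 := by
          rw [ih, pvSumIte, if_pos (pvDig_lt exp base hb y)]
      _ = (y :: s).length := by simp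

-- writing into one segment of a flattened list of segments
lemma pvFlattenSet (v : Int) :
    ∀ (M : Nat) (g : Nat → List Int) (j0 k off : Nat), j0 < M → k < (g j0).length →
    off = ((List.range j0).map (fun i => (g i).length)).sum →
    ((((List.range M).map g).flatten).set (off + k) v)
      = ((List.range M).map (fun j => if j = j0 then (g j0).set k v else g j)).flatten := by
  intro M
  induction M with
  | zero => intro g j0 k off hj hk hoff; exact absurd hj (Nat.not_lt_zero j0)
  | succ m ih =>
    intro g j0 k off hj hk hoff
    rw [List.range_succ_eq_map, List.map_cons, List.flatten_cons, List.map_cons, List.flatten_cons]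
    cases j0 with
    | zero =>
      have hoff0 : off = 0 := by simpa using hoff
      subst hoff0
      rw [Nat.zero_add, pvSetAppendLeft _ _ _ _ hk]
      rw [if_pos rfl]
      congr 1
      rw [List.map_map, List.map_map]
      apply congrArg List.flatten
      apply List.map_congr_left
      intro i _
      simp [Function.comp]
    | succ t =>
      have hj' : t < m := by omega
      have hoff2 : off = (g 0).length
          + ((List.range t).map (fun i => (g (i + 1)).length)).sum := by
        rw [hoff, List.range_succ_eq_map, List.map_cons, List.sum_cons, List.map_map]
        simp [Function.comp_def, Nat.succ_eq_add_one]
      rw [List.map_map]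
      simp only [Function.comp_def, Nat.succ_eq_add_one]
      rw [hoff2, Nat.add_assoc, pvSetAppendRight,
          ih (fun i => g (i + 1)) t k (((List.range t).map (fun i => (g (i + 1)).length)).sum)
            hj' hk rfl]
      rw [if_neg (by omega : ¬ (0 : Nat) = t + 1)]
      congr 1
      rw [List.map_map]
      simp only [Function.comp_def, Nat.succ_eq_add_one]
      apply congrArg List.flatten
      apply List.map_congr_left
      intro i _
      by_cases h : i = t
      · subst h
        simp
      · have h2 : ¬ (i + 1 = t + 1) := by omega
        simp [h, h2]

-- the backward placement loop: full invariant
lemma pvPlaceLoop (exp base : Int) (hb : 0 < base) (f : Nat → Nat) (seg : Nat → List Int)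
    (hseg : ∀ j, (seg j).length = f j) :
    ∀ (s : List Int) (a : Nat → Nat), (∀ j, a j + pvCnt exp base j s = f j) →
    (s.reverse).foldl
      (fun (st : List Int × List Int) x =>
        (PySem.List.pySetD st.1 (PySem.Int.mod (PySem.Int.floordiv x exp) base)
           (PySem.List.pyGetD st.1 (PySem.Int.mod (PySem.Int.floordiv x exp) base) 0 - 1),
         PySem.List.pySetD st.2
           (PySem.List.pyGetD st.1 (PySem.Int.mod (PySem.Int.floordiv x exp) base) 0 - 1) x))
      ((List.range base.toNat).map (fun j => ((pvOff f (j + 1) : Nat) : Int)),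
       ((List.range base.toNat).map seg).flatten)
    = ((List.range base.toNat).map (fun j => ((pvOff f j + a j : Nat) : Int)),
       ((List.range base.toNat).map
          (fun j => (seg j).take (a j) ++ s.filter (fun y => pvDig exp base y == j))).flatten) := by
  intro s
  induction s with
  | nil =>
    intro a ha
    have ha' : ∀ j, a j = f j := by
      intro j; have := ha j; simp [pvCnt] at this; omega
    simp only [List.reverse_nil, List.foldl_nil]
    have h1 : (List.range base.toNat).map (fun j => ((pvOff f (j + 1) : Nat) : Int))
        = (List.range base.toNat).map (fun j => ((pvOff f j + a j : Nat) : Int)) :=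
      List.map_congr_left (fun j _ => by rw [pvOff_succ, ha' j])
    have h2 : (List.range base.toNat).map seg
        = (List.range base.toNat).map
            (fun j => (seg j).take (a j) ++ List.filter (fun y => pvDig exp base y == j) []) :=
      List.map_congr_left (fun j _ => by
        rw [List.filter_nil, List.append_nil, ha' j, ← hseg j, List.take_length])
    rw [h1, h2]
  | cons y s ih =>
    intro a ha
    have ha' : ∀ j, (if j = pvDig exp base y then a j + 1 else a j) + pvCnt exp base j s = f j := by
      intro j
      have h0 := ha j
      have hc : pvCnt exp base j (y :: s)
          = pvCnt exp base j s + (if pvDig exp base y = j then 1 else 0) := by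
        simp only [pvCnt, List.countP_cons, beq_iff_eq]
      rcases eq_or_ne j (pvDig exp base y) with h | h
      · rw [hc, if_pos h.symm] at h0
        rw [if_pos h]
        omega
      · rw [hc, if_neg (Ne.symm h)] at h0
        rw [if_neg h]
        omega
    rw [List.reverse_cons, List.foldl_append,
        ih (fun j => if j = pvDig exp base y then a j + 1 else a j) ha']
    simp only [List.foldl_cons, List.foldl_nil]
    have hdlt := pvDig_lt exp base hb y
    rw [pvDig_cast exp base hb y, PySem.List.pyGetD_natCast,
        PySem.List.getD_map_range _ _ _ _ hdlt]
    simp only [if_true]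
    have hc1 : ((pvOff f (pvDig exp base y) + (a (pvDig exp base y) + 1) : Nat) : Int) - 1
        = ((pvOff f (pvDig exp base y) + a (pvDig exp base y) : Nat) : Int) := by
      push_cast; ring
    rw [hc1, PySem.List.pySetD_natCast, PySem.List.pySetD_natCast,
        pvSet_map_range _ _ _ _ hdlt]
    have hlen : ∀ j, ((seg j).take (if j = pvDig exp base y then a j + 1 else a j)
        ++ s.filter (fun y' => pvDig exp base y' == j)).length = f j := by
      intro j
      have h1 := ha' j
      rw [List.length_append, List.length_take, hseg j, ← List.countP_eq_length_filter]
      have h2 : s.countP (fun y' => pvDig exp base y' == j) = pvCnt exp base j s := rfl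
      rw [h2]
      omega
    have hcnty : 1 ≤ pvCnt exp base (pvDig exp base y) (y :: s) := by
      simp [pvCnt, List.countP_cons]
    have hk : a (pvDig exp base y)
        < ((seg (pvDig exp base y)).take
            (if pvDig exp base y = pvDig exp base y then a (pvDig exp base y) + 1
             else a (pvDig exp base y))
          ++ s.filter (fun y' => pvDig exp base y' == pvDig exp base y)).length := by
      rw [hlen]
      have := ha (pvDig exp base y)
      omega
    have hoffeq : pvOff f (pvDig exp base y) + a (pvDig exp base y)
        = ((List.range (pvDig exp base y)).map
            (fun i => ((seg i).take (if i = pvDig exp base y then a i + 1 else a i)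
              ++ s.filter (fun y' => pvDig exp base y' == i)).length)).sum + a (pvDig exp base y) := by
      have : pvOff f (pvDig exp base y)
          = ((List.range (pvDig exp base y)).map
              (fun i => ((seg i).take (if i = pvDig exp base y then a i + 1 else a i)
                ++ s.filter (fun y' => pvDig exp base y' == i)).length)).sum := by
        rw [pvOff]
        exact congrArg _ (List.map_congr_left (fun i _ => (hlen i).symm))
      omega
    rw [hoffeq, pvFlattenSet y base.toNat _ (pvDig exp base y) (a (pvDig exp base y)) _ hdlt hk rfl]
    refine Prod.ext ?_ ?_
    · apply List.map_congr_left
      intro j hj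
      rcases eq_or_ne j (pvDig exp base y) with h | h
      · rw [if_pos h, h, ← hoffeq]
      · rw [if_neg h, if_neg h]
    · apply congrArg List.flatten
      apply List.map_congr_left
      intro j hj
      rcases eq_or_ne j (pvDig exp base y) with h | h
      · subst h
        rw [if_pos rfl, if_pos rfl]
        have htk : a (pvDig exp base y) + 1 ≤ (seg (pvDig exp base y)).length := by
          rw [hseg]
          have h3 := ha' (pvDig exp base y)
          rw [if_pos rfl] at h3
          omega
        rw [pvSetAppendLeft _ _ _ _ (by rw [List.length_take]; omega),
            pvTakeSet _ _ _ htk]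
        simp [List.append_assoc]
      · rw [if_neg h, if_neg h]
        simp [Ne.symm h]

-- the whole function, for positive base
lemma pvMain (values : List Int) (exp base : Int) (hb : 0 < base) :
    stable_counting_pass_py values exp base = stable_counting_pass_py_alt values exp base := by
  have hbn : ((base.toNat : Nat) : Int) = base := Int.toNat_of_nonneg (by omega)
  have hrepl0 : (List.replicate base.toNat (0 : Int))
      = (List.range base.toNat).map (fun _ => (0 : Int)) := by
    rw [List.map_const', List.length_range]
  have hreplnil : (List.replicate base.toNat ([] : List Int))
      = (List.range base.toNat).map (fun _ => ([] : List Int)) := by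
    rw [List.map_const', List.length_range]
  simp only [stable_counting_pass_py, stable_counting_pass_py_alt]
  rw [hrepl0, hreplnil, pvCountLoop exp base hb values (fun _ => 0),
      pvBucketLoop exp base hb values (fun _ => [])]
  have hcounts : (List.range base.toNat).map (fun j => (0 : Int) + (pvCnt exp base j values : Int))
      = (List.range base.toNat).map (fun j => (pvCnt exp base j values : Int)) :=
    List.map_congr_left (fun j _ => by ring)
  have hbuck : (List.range base.toNat).map
        (fun j => ([] : List Int) ++ values.filter (fun y => pvDig exp base y == j))
      = (List.range base.toNat).map (fun j => values.filter (fun y => pvDig exp base y == j)) :=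
    List.map_congr_left (fun j _ => by rw [List.nil_append])
  rw [hcounts, hbuck]
  -- prefix-sum loop
  have hpre := pvPrefixAux (fun j => (pvCnt exp base j values : Int)) base.toNat base.toNat
      (by omega) (le_refl _)
  rw [hbn] at hpre
  rw [hpre]
  have hpref2 : (List.range base.toNat).map (fun j => if j < base.toNat
        then ((List.range (j + 1)).map (fun i => (pvCnt exp base i values : Int))).sum
        else (pvCnt exp base j values : Int))
      = (List.range base.toNat).map
          (fun j => ((pvOff (fun i => pvCnt exp base i values) (j + 1) : Nat) : Int)) := by
    apply List.map_congr_left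
    intro j hj
    rw [if_pos (List.mem_range.mp hj)]
    simp only [pvOff]
    exact pvCastSum (fun i => pvCnt exp base i values) (List.range (j + 1))
  rw [hpref2]
  -- initial output array as flattened zero segments
  have hout : (List.replicate values.length (0 : Int))
      = ((List.range base.toNat).map
          (fun j => List.replicate (pvCnt exp base j values) (0 : Int))).flatten := by
    rw [pvFlattenReplicate, pvSumCnt exp base hb]
  rw [hout]
  -- backward loop: descending index range over values = foldl over values.reverse
  have hdesc : PySem.List.pyRange ((values.length : Int) - 1) (-1) (-1)
      = (PySem.List.pyRange 0 (values.length : Int) 1).reverse := by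
    rw [PySem.List.pyRange_neg_one_eq_reverse]
    norm_num
  rw [hdesc,
      ← List.foldl_map (f := fun i => PySem.List.pyGetD values i 0)
        (g := fun (st : List Int × List Int) x =>
          (PySem.List.pySetD st.1 (PySem.Int.mod (PySem.Int.floordiv x exp) base)
             (PySem.List.pyGetD st.1 (PySem.Int.mod (PySem.Int.floordiv x exp) base) 0 - 1),
           PySem.List.pySetD st.2
             (PySem.List.pyGetD st.1 (PySem.Int.mod (PySem.Int.floordiv x exp) base) 0 - 1) x)),
      List.map_reverse, PySem.List.map_pyGetD_pyRange_zero',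
      pvPlaceLoop exp base hb (fun j => pvCnt exp base j values)
        (fun j => List.replicate (pvCnt exp base j values) (0 : Int))
        (fun j => by rw [List.length_replicate]) values (fun _ => 0)
        (fun j => Nat.zero_add _)]
  have hfin : (List.range base.toNat).map
        (fun j => (List.replicate (pvCnt exp base j values) (0 : Int)).take 0
          ++ values.filter (fun y => pvDig exp base y == j))
      = (List.range base.toNat).map (fun j => values.filter (fun y => pvDig exp base y == j)) :=
    List.map_congr_left (fun j _ => by rw [List.take_zero, List.nil_append])
  have hhist : ((List.range base.toNat).map
        (fun j => values.filter (fun y => pvDig exp base y == j))).map (fun b => (b.length : Int))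
      = (List.range base.toNat).map (fun j => (pvCnt exp base j values : Int)) := by
    rw [List.map_map]
    exact List.map_congr_left (fun j _ => by
      simp [Function.comp, pvCnt, List.countP_eq_length_filter])
  rw [hfin, hhist]

-- ===== VERDICT (by name: the statement is the Claim_ definition above) =====
theorem stable_counting_pass_py_spec : Claim_equal_stable_counting_pass_py := by
  intro values exp base _ hpre
  unfold Spec_stable_counting_pass_py
  by_cases hb : 0 < base
  · exact pvMain values exp base hb
  · have hv : values = [] := by
      rcases hpre with h | ⟨_, h⟩
      · exact h
      · omega
    subst hv
    have hN : base.toNat = 0 := by omega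
    simp [stable_counting_pass_py, stable_counting_pass_py_alt, hN,
          PySem.List.pyRange_one_eq_nil (by omega : base ≤ 1)]
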